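-- pv_equiv track=rewrite | github.com/MrBrantCode/unitest_baseline | mut_generate/mist_train_cf/cf_12019/solution.py | same_frequency
-- ===== SOURCE A (Python) =====
-- def same_frequency(num1, num2):
--     digit_count1 = [0] * 10
--     digit_count2 = [0] * 10
--
--     # Count the frequency of each digit in num1
--     while num1 > 0:
--         digit = num1 % 10
--         digit_count1[digit] += 1
--         num1 //= 10
--
--     # Count the frequency of each digit in num2
--     while num2 > 0:
--         digit = num2 % 10
--         digit_count2[digit] += 1
--         num2 //= 10
--
--     # Check if the frequency of each digit is the same in both numbers
--     for i in range(10):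
--         if digit_count1[i] != digit_count2[i]:
--             return False
--
--     return True
-- ===== SOURCE B (Python) =====
-- def same_frequency(num1, num2):
--     def digits(n):
--         return [] if n <= 0 else digits(n // 10) + [n % 10]
--     return sorted(digits(num1)) == sorted(digits(num2))
-- ===== Notes on version B (the rewrite author's own statement) =====
-- stated objective: simpler
-- what changed: Replaces the two in-place bucket-counting while loops and the 10-way array comparison with a recursive digit-list extraction followed by sort-and-compare.
import Mathlib
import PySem

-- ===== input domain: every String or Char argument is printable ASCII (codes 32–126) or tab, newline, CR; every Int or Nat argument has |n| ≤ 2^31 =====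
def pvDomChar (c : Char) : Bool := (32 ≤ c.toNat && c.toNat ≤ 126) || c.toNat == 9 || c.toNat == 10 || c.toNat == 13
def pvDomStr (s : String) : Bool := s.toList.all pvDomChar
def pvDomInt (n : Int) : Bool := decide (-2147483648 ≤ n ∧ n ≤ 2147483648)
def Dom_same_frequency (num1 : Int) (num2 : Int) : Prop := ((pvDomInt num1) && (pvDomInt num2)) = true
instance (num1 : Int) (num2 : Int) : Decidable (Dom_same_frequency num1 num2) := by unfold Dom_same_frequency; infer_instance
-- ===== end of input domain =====

-- B replaces A's two bucket-counting while loops and 10-way array comparison with a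
-- recursive digit-list extraction followed by sort-and-compare (objective: simpler).

-- ===== PORT A =====
-- the 'while num > 0' counting loop of A: digit = num % 10; digit_count[digit] += 1; num //= 10
def pvCountLoop (n : Int) (cnt : List Int) : List Int :=
  if h : 0 < n then
    let digit := PySem.Int.mod n 10
    pvCountLoop (PySem.Int.floordiv n 10) (cnt.set digit.toNat (cnt.getD digit.toNat 0 + 1))
  else cnt
termination_by n.toNat
decreasing_by
  have h10 : (0:Int) < 10 := by norm_num
  rw [PySem.Int.floordiv_eq_ediv_of_pos h10]
  omega

def same_frequency (num1 : Int) (num2 : Int) : Bool :=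
  let digit_count1 := pvCountLoop num1 (List.replicate 10 0)
  let digit_count2 := pvCountLoop num2 (List.replicate 10 0)
  -- for i in range(10): if digit_count1[i] != digit_count2[i]: return False / return True
  (PySem.List.pyRange 0 10 1).all
    (fun i => PySem.List.pyGetD digit_count1 i 0 == PySem.List.pyGetD digit_count2 i 0)

-- ===== PORT B =====
-- digits(n): [] if n <= 0 else digits(n // 10) + [n % 10]
def pvDigits (n : Int) : List Int :=
  if _h : n ≤ 0 then [] else
    pvDigits (PySem.Int.floordiv n 10) ++ [PySem.Int.mod n 10]
termination_by n.toNat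
decreasing_by
  have h10 : (0:Int) < 10 := by norm_num
  rw [PySem.Int.floordiv_eq_ediv_of_pos h10]
  omega

def same_frequency_alt (num1 : Int) (num2 : Int) : Bool :=
  PySem.List.sorted (pvDigits num1) (fun x => x) false
    == PySem.List.sorted (pvDigits num2) (fun x => x) false

-- ===== PRECONDITION & SPEC =====
def Spec_same_frequency (num1 : Int) (num2 : Int) (out : Bool) : Prop := out = same_frequency_alt num1 num2
instance (num1 : Int) (num2 : Int) (out : Bool) : Decidable (Spec_same_frequency num1 num2 out) := by unfold Spec_same_frequency; infer_instance

-- ===== CLAIM (what is proved, stated in full; the proofs are below) =====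
def Claim_equal_same_frequency : Prop := ∀ (num1 : Int) (num2 : Int), Dom_same_frequency num1 num2 → Spec_same_frequency num1 num2 (same_frequency num1 num2)

-- ===== LEMMAS AND PROOFS =====

-- every extracted digit lies in [0, 10)
lemma pvDigits_mem (n : Int) : ∀ x ∈ pvDigits n, 0 ≤ x ∧ x < 10 := by
  induction n using pvDigits.induct with
  | case1 n h => rw [pvDigits]; simp [h]
  | case2 n h ih =>
    rw [pvDigits]; simp only [h, dite_false, List.mem_append, List.mem_singleton]
    rintro x (hx | rfl)
    · exact ih x hx
    · exact ⟨PySem.Int.mod_nonneg _ (by norm_num), PySem.Int.mod_lt _ (by norm_num)⟩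

-- loop invariant: bucket i of the count array gains exactly the number of digits equal to i
lemma pvCountLoop_count (n : Int) (cnt : List Int) :
    ∀ i : Nat, i < cnt.length →
      (pvCountLoop n cnt).getD i 0 = cnt.getD i 0 + ((pvDigits n).count (i : Int) : Int) := by
  induction n, cnt using pvCountLoop.induct with
  | case1 n cnt h digit ih =>
    intro i hi
    have hd0 : 0 ≤ PySem.Int.mod n 10 := PySem.Int.mod_nonneg _ (by norm_num)
    have hdlt : PySem.Int.mod n 10 < 10 := PySem.Int.mod_lt _ (by norm_num)
    rw [pvCountLoop]
    simp only [h, dite_true]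
    rw [ih i (by simpa using hi)]
    have hn : ¬ n ≤ 0 := by omega
    have hdig : pvDigits n = pvDigits (PySem.Int.floordiv n 10) ++ [PySem.Int.mod n 10] := by
      rw [pvDigits]; simp [hn]
    rw [hdig]
    simp only [List.count_append, List.count_singleton]
    have hem : PySem.Int.mod n 10 = n % 10 := PySem.Int.mod_eq_emod_of_pos (by norm_num)
    by_cases he : (PySem.Int.mod n 10) = (i : Int)
    · have hti : (PySem.Int.mod n 10).toNat = i := by omega
      rw [hti, List.getD_eq_getElem?_getD, List.getElem?_set_self (by omega),
        List.getD_eq_getElem?_getD, if_pos (by simpa using he)]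
      simp only [Option.getD_some]
      push_cast
      ring
    · have hne : (PySem.Int.mod n 10).toNat ≠ i := by omega
      rw [List.getD_eq_getElem?_getD, List.getElem?_set_ne hne, ← List.getD_eq_getElem?_getD,
        if_neg (by simpa using he)]
      simp
  | case2 n cnt h =>
    intro i hi
    rw [pvCountLoop, pvDigits]
    have hn : n ≤ 0 := by omega
    simp [h, hn]

-- A's verdict characterised by digit counts
lemma same_frequency_iff (num1 num2 : Int) :
    same_frequency num1 num2 = true ↔
      ∀ i : Nat, i < 10 → (pvDigits num1).count (i : Int) = (pvDigits num2).count (i : Int) := by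
  unfold same_frequency
  simp only [List.all_eq_true, beq_iff_eq]
  constructor
  · intro hall i hi
    have hmem : (i : Int) ∈ PySem.List.pyRange 0 10 1 := by
      rw [PySem.List.mem_pyRange_one]; omega
    have hv := hall _ hmem
    rw [PySem.List.pyGetD_natCast, PySem.List.pyGetD_natCast,
      pvCountLoop_count _ _ i (by simpa using hi), pvCountLoop_count _ _ i (by simpa using hi)]
      at hv
    simp at hv
    omega
  · intro hc i hmem
    rw [PySem.List.mem_pyRange_one] at hmem
    obtain ⟨h0, hlt⟩ := hmem
    lift i to ℕ using h0
    rw [PySem.List.pyGetD_natCast, PySem.List.pyGetD_natCast,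
      pvCountLoop_count _ _ i (by simp; omega), pvCountLoop_count _ _ i (by simp; omega),
      hc i (by omega)]

-- B's verdict characterised by digit counts
lemma same_frequency_alt_iff (num1 num2 : Int) :
    same_frequency_alt num1 num2 = true ↔
      ∀ i : Nat, i < 10 → (pvDigits num1).count (i : Int) = (pvDigits num2).count (i : Int) := by
  unfold same_frequency_alt
  rw [beq_iff_eq, PySem.List.sorted_id_eq_sorted_id_iff_perm, List.perm_iff_count]
  constructor
  · intro hp i _; exact hp (i : Int)
  · intro hc a
    by_cases ha : 0 ≤ a ∧ a < 10
    · have : a = ((a.toNat : Nat) : Int) := by omega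
      rw [this]; exact hc a.toNat (by omega)
    · have h1 : a ∉ pvDigits num1 := fun hm => ha (pvDigits_mem num1 a hm)
      have h2 : a ∉ pvDigits num2 := fun hm => ha (pvDigits_mem num2 a hm)
      rw [List.count_eq_zero_of_not_mem h1, List.count_eq_zero_of_not_mem h2]

-- ===== VERDICT (by name: the statement is the Claim_ definition above) =====
theorem same_frequency_spec : Claim_equal_same_frequency := by
  intro num1 num2 _
  unfold Spec_same_frequency
  rw [Bool.eq_iff_iff, same_frequency_iff, same_frequency_alt_iff]
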